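-- pv_equiv track=rewrite | github.com/alaiakim/codetest | 연습.py | solution
-- ===== SOURCE A (Python) =====
-- def solution(board):
--     n = len(board)
--     answer = 0
--     for i in range(n):
--         for j in range(n):
--
--             f_r = 0 if i == 0 else -1
--             t_r = 0 if i == n-1 else 1
--             f_c = 0 if j == 0 else -1
--             t_c = 0 if j == n-1 else 1
--
--             isSafe = True
--             for r in range(i+f_r, i+t_r+1):
--                 if isSafe == False:
--                     break
--                 for c in range(j+f_c, j+t_c+1):
--                     if board[r][c] == 1:
--                         isSafe = False
--                         break
--
--             if isSafe == True:
--                 answer += 1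
--
--     return answer
-- ===== SOURCE B (Python) =====
-- def solution(board):
--     n = len(board)
--     unsafe = set()
--     for i in range(n):
--         for j in range(n):
--             if board[i][j] == 1:
--                 for r in range(max(0, i - 1), min(n - 1, i + 1) + 1):
--                     for c in range(max(0, j - 1), min(n - 1, j + 1) + 1):
--                         unsafe.add((r, c))
--     return sum(1 for i in range(n) for j in range(n) if (i, j) not in unsafe)
-- ===== Notes on version B (the rewrite author's own statement) =====
-- stated objective: alternative
-- what changed: Instead of scanning each cell's 3x3 neighborhood with flag-and-break loops, B scatters: every 1-cell marks its clamped 3x3 neighborhood in an 'unsafe' set once, then safe cells are counted by set membership; the per-cell 9-cell gather scan disappears (only 1-cells pay it).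
-- outside the precondition, e.g. on solution([[1, 1], [1]]): A returns 0, B raises IndexError
import Mathlib
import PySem

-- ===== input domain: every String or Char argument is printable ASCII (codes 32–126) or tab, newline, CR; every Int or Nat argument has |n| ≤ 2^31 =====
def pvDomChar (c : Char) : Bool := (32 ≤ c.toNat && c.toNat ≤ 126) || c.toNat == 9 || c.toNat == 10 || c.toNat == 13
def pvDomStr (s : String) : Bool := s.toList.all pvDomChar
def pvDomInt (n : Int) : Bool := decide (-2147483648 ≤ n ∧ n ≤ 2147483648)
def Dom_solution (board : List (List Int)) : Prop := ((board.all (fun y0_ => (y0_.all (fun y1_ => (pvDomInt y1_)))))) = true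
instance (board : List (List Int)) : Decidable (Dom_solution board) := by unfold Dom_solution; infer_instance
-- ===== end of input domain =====

-- B replaces A's per-cell 3x3 gather scan (with flag/break loops) by a scatter pass: each 1-cell
-- marks its clamped neighborhood in an 'marked' set, then safe cells are counted by membership.

-- board[r][c]; exact under Pre_solution (both indices are then in range, so the defaults are never used)
def pvCell (board : List (List Int)) (r c : Int) : Int :=
  PySem.List.pyGetD (PySem.List.pyGetD board r []) c 0

-- ===== PORT A =====
def solution (board : List (List Int)) : Int :=
  let n : Int := PySem.List.len board
  (PySem.List.pyRange 0 n 1).foldl (fun answer i =>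
    (PySem.List.pyRange 0 n 1).foldl (fun answer j =>
      let fr : Int := if i = 0 then 0 else -1
      let tr : Int := if i = n - 1 then 0 else 1
      let fc : Int := if j = 0 then 0 else -1
      let tc : Int := if j = n - 1 then 0 else 1
      -- the two 'break's are ported as a short-circuiting flag over the same ranges
      let isSafe : Bool :=
        (PySem.List.pyRange (i + fr) (i + tr + 1) 1).foldl (fun s r =>
          if s = false then s
          else (PySem.List.pyRange (j + fc) (j + tc + 1) 1).foldl (fun s' c =>
            if pvCell board r c = 1 then false else s') s) true
      if isSafe = true then answer + 1 else answer) answer) 0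

-- ===== PORT B =====
def solution_alt (board : List (List Int)) : Int :=
  let n : Int := PySem.List.len board
  let marked : PySem.Set (Int × Int) :=
    (PySem.List.pyRange 0 n 1).foldl (fun s i =>
      (PySem.List.pyRange 0 n 1).foldl (fun s j =>
        if pvCell board i j = 1 then
          (PySem.List.pyRange (max 0 (i - 1)) (min (n - 1) (i + 1) + 1) 1).foldl (fun s r =>
            (PySem.List.pyRange (max 0 (j - 1)) (min (n - 1) (j + 1) + 1) 1).foldl (fun s c =>
              PySem.Set.add s (r, c)) s) s
        else s) s) PySem.Set.empty
  (PySem.List.pyRange 0 n 1).foldl (fun acc i =>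
    (PySem.List.pyRange 0 n 1).foldl (fun acc j =>
      if (i, j) ∈ marked then acc else acc + 1) acc) 0

-- ===== PRECONDITION & SPEC =====
-- Pre_ excludes ragged boards whose rows are shorter than len(board): there A generally raises
-- IndexError and only returns by accident of an early break, and B raises IndexError as well.
def Pre_solution (board : List (List Int)) : Prop :=
  ∀ row ∈ board, board.length ≤ row.length
instance (board : List (List Int)) : Decidable (Pre_solution board) := by
  unfold Pre_solution; infer_instance
def pvWitness_solution : List (List Int) := [[0, 1], [0, 0]]

def Spec_solution (board : List (List Int)) (out : Int) : Prop := out = solution_alt board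
instance (board : List (List Int)) (out : Int) : Decidable (Spec_solution board out) := by
  unfold Spec_solution; infer_instance

-- ===== CLAIM (what is proved, stated in full; the proofs are below) =====
def Claim_equal_solution : Prop := ∀ (board : List (List Int)), Dom_solution board → Pre_solution board → Spec_solution board (solution board)

-- ===== LEMMAS AND PROOFS =====

-- b lies in the clamped 3x3 row-neighborhood of a on a board of side n
def pvNear (n a b : Int) : Prop := a - 1 ≤ b ∧ b ≤ a + 1 ∧ 0 ≤ b ∧ b < n

-- generic membership through a fold whose body only adds elements
theorem pv_mem_foldl_of_mem_iff {α β : Type} (g : List α → β → List α) (P : β → α → Prop)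
    (hg : ∀ s x y, y ∈ g s x ↔ y ∈ s ∨ P x y) (l : List β) (s : List α) (y : α) :
    y ∈ l.foldl g s ↔ y ∈ s ∨ ∃ x ∈ l, P x y := by
  induction l generalizing s with
  | nil => simp
  | cons a t ih =>
    simp only [List.foldl_cons, ih, hg, List.mem_cons]
    constructor
    · rintro ((h | h) | ⟨x, hx, hP⟩)
      · exact Or.inl h
      · exact Or.inr ⟨a, Or.inl rfl, h⟩
      · exact Or.inr ⟨x, Or.inr hx, hP⟩
    · rintro (h | ⟨x, (rfl | hx), hP⟩)
      · exact Or.inl (Or.inl h)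
      · exact Or.inl (Or.inr hP)
      · exact Or.inr ⟨x, hx, hP⟩

-- flagged fold = none of the scanned cells is a 1
theorem pv_inner_flag (l : List Int) (p : Int → Prop) [DecidablePred p] (b : Bool) :
    l.foldl (fun s c => if p c then false else s) b = (b && !l.any (fun c => decide (p c))) := by
  induction l generalizing b with
  | nil => simp
  | cons a t ih =>
    simp only [List.foldl_cons, List.any_cons, ih]
    by_cases h : p a <;> simp [h]

theorem pv_outer_flag (l : List Int) (g : Int → List Int) (p : Int → Int → Prop)
    [∀ r c, Decidable (p r c)] (b : Bool) :
    l.foldl (fun s r => if s = false then s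
      else (g r).foldl (fun s' c => if p r c then false else s') s) b
    = (b && l.all (fun r => !(g r).any (fun c => decide (p r c)))) := by
  induction l generalizing b with
  | nil => simp
  | cons a t ih =>
    simp only [List.foldl_cons, List.all_cons, ih]
    cases b with
    | false => simp
    | true => rw [pv_inner_flag]; simp

-- B's 'marked' set as a standalone term (definitionally the let-bound set inside solution_alt)
def pvMarked (board : List (List Int)) : PySem.Set (Int × Int) :=
  (PySem.List.pyRange 0 (PySem.List.len board) 1).foldl (fun s i =>
    (PySem.List.pyRange 0 (PySem.List.len board) 1).foldl (fun s j =>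
      if pvCell board i j = 1 then
        (PySem.List.pyRange (max 0 (i - 1)) (min (PySem.List.len board - 1) (i + 1) + 1) 1).foldl (fun s r =>
          (PySem.List.pyRange (max 0 (j - 1)) (min (PySem.List.len board - 1) (j + 1) + 1) 1).foldl (fun s c =>
            PySem.Set.add s (r, c)) s) s
      else s) s) PySem.Set.empty

theorem pv_solution_alt_eq (board : List (List Int)) :
    solution_alt board
    = (PySem.List.pyRange 0 (PySem.List.len board) 1).foldl (fun acc i =>
        (PySem.List.pyRange 0 (PySem.List.len board) 1).foldl (fun acc j =>
          if (i, j) ∈ pvMarked board then acc else acc + 1) acc) 0 := rfl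

theorem pv_mem_marked (board : List (List Int)) (y : Int × Int) :
    y ∈ pvMarked board
    ↔ ∃ p q : Int, (0 ≤ p ∧ p < PySem.List.len board) ∧ (0 ≤ q ∧ q < PySem.List.len board) ∧
        pvCell board p q = 1 ∧ pvNear (PySem.List.len board) p y.1 ∧ pvNear (PySem.List.len board) q y.2 := by
  have h3 : ∀ (r : Int) (Rj : List Int) (s : PySem.Set (Int × Int)) (y : Int × Int),
      y ∈ Rj.foldl (fun s c => PySem.Set.add s (r, c)) s ↔ y ∈ s ∨ ∃ c ∈ Rj, y = (r, c) :=
    fun r Rj s y =>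
      pv_mem_foldl_of_mem_iff (fun s c => PySem.Set.add s (r, c)) (fun c y => y = (r, c))
        (fun s c y => PySem.Set.mem_add s (r, c) y) Rj s y
  have h2 : ∀ (Ri Rj : List Int) (s : PySem.Set (Int × Int)) (y : Int × Int),
      y ∈ Ri.foldl (fun s r => Rj.foldl (fun s c => PySem.Set.add s (r, c)) s) s
      ↔ y ∈ s ∨ ∃ r ∈ Ri, ∃ c ∈ Rj, y = (r, c) :=
    fun Ri Rj s y =>
      pv_mem_foldl_of_mem_iff (fun s r => Rj.foldl (fun s c => PySem.Set.add s (r, c)) s)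
        (fun r y => ∃ c ∈ Rj, y = (r, c)) (fun s r y => h3 r Rj s y) Ri s y
  have h1 : ∀ (i : Int) (s : PySem.Set (Int × Int)) (y : Int × Int),
      y ∈ (PySem.List.pyRange 0 (PySem.List.len board) 1).foldl (fun s j =>
          if pvCell board i j = 1 then
            (PySem.List.pyRange (max 0 (i - 1)) (min (PySem.List.len board - 1) (i + 1) + 1) 1).foldl (fun s r =>
              (PySem.List.pyRange (max 0 (j - 1)) (min (PySem.List.len board - 1) (j + 1) + 1) 1).foldl (fun s c =>
                PySem.Set.add s (r, c)) s) s
          else s) s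
      ↔ y ∈ s ∨ ∃ j ∈ PySem.List.pyRange 0 (PySem.List.len board) 1,
          pvCell board i j = 1 ∧
          ∃ r ∈ PySem.List.pyRange (max 0 (i - 1)) (min (PySem.List.len board - 1) (i + 1) + 1) 1,
          ∃ c ∈ PySem.List.pyRange (max 0 (j - 1)) (min (PySem.List.len board - 1) (j + 1) + 1) 1,
            y = (r, c) := by
    intro i s y
    refine pv_mem_foldl_of_mem_iff
      (fun s j =>
        if pvCell board i j = 1 then
          (PySem.List.pyRange (max 0 (i - 1)) (min (PySem.List.len board - 1) (i + 1) + 1) 1).foldl (fun s r =>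
            (PySem.List.pyRange (max 0 (j - 1)) (min (PySem.List.len board - 1) (j + 1) + 1) 1).foldl (fun s c =>
              PySem.Set.add s (r, c)) s) s
        else s)
      (fun j y =>
        pvCell board i j = 1 ∧
        ∃ r ∈ PySem.List.pyRange (max 0 (i - 1)) (min (PySem.List.len board - 1) (i + 1) + 1) 1,
        ∃ c ∈ PySem.List.pyRange (max 0 (j - 1)) (min (PySem.List.len board - 1) (j + 1) + 1) 1,
          y = (r, c))
      (fun s j y => ?_) _ s y
    by_cases hc : pvCell board i j = 1
    · simp [hc, h2]
    · simp [hc]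
  rw [pvMarked, pv_mem_foldl_of_mem_iff _ _ (fun s i y => h1 i s y)]
  simp only [PySem.Set.empty, List.not_mem_nil, false_or, PySem.List.mem_pyRange_one, pvNear]
  constructor
  · rintro ⟨p, hp, q, hq, hc, r, hr, c, hc2, rfl⟩
    exact ⟨p, q, hp, hq, hc, by omega, by omega⟩
  · rintro ⟨p, q, hp, hq, hc, hnr, hnc⟩
    exact ⟨p, hp, q, hq, hc, y.1, by omega, y.2, by omega, rfl⟩

-- the value A's flag loop computes for cell (i, j), written over the clamped ranges
def pvSafe (board : List (List Int)) (i j : Int) : Bool :=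
  (PySem.List.pyRange (max 0 (i - 1)) (min (PySem.List.len board - 1) (i + 1) + 1) 1).all (fun r =>
    !(PySem.List.pyRange (max 0 (j - 1)) (min (PySem.List.len board - 1) (j + 1) + 1) 1).any
      (fun c => decide (pvCell board r c = 1)))

theorem pv_safe_iff_not_marked (board : List (List Int)) (i j : Int)
    (hi : 0 ≤ i ∧ i < PySem.List.len board) (hj : 0 ≤ j ∧ j < PySem.List.len board) :
    pvSafe board i j = true ↔ (i, j) ∉ pvMarked board := by
  rw [pvSafe, pv_mem_marked]
  simp only [List.all_eq_true, Bool.not_eq_eq_eq_not, Bool.not_true, List.any_eq_false,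
    decide_eq_true_eq, PySem.List.mem_pyRange_one, not_exists]
  constructor
  · intro h p q
    rintro ⟨hp, hq, hc, hnp, hnq⟩
    unfold pvNear at hnp hnq
    exact h p (by omega) q (by omega) hc
  · intro h r hr c hc hcell
    exact h r c ⟨by unfold pvNear at *; omega, by omega, hcell, by unfold pvNear; omega,
      by unfold pvNear; omega⟩

theorem solution_spec : Claim_equal_solution := by
  intro board _ _
  unfold Spec_solution
  rw [pv_solution_alt_eq]
  show (PySem.List.pyRange 0 (PySem.List.len board) 1).foldl _ 0 = _
  refine PySem.List.foldl_congr_mem' _ _ _ _ (fun i hi acc => ?_)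
  refine PySem.List.foldl_congr_mem' _ _ _ _ (fun j hj acc => ?_)
  rw [PySem.List.mem_pyRange_one] at hi hj
  -- reduce A's flag loops to pvSafe over the clamped ranges
  have hrow : i + (if i = 0 then (0:Int) else -1) = max 0 (i - 1) := by split_ifs <;> omega
  have hrow2 : i + (if i = PySem.List.len board - 1 then (0:Int) else 1) + 1
      = min (PySem.List.len board - 1) (i + 1) + 1 := by split_ifs <;> omega
  have hcol : j + (if j = 0 then (0:Int) else -1) = max 0 (j - 1) := by split_ifs <;> omega
  have hcol2 : j + (if j = PySem.List.len board - 1 then (0:Int) else 1) + 1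
      = min (PySem.List.len board - 1) (j + 1) + 1 := by split_ifs <;> omega
  simp only [hrow, hrow2, hcol, hcol2, pv_outer_flag, Bool.true_and]
  have hsafe := pv_safe_iff_not_marked board i j hi hj
  rw [pvSafe] at hsafe
  by_cases hm : (i, j) ∈ pvMarked board
  · rw [if_neg (by simpa [hm] using fun h => (hsafe.mp h) hm), if_pos hm]
  · rw [if_pos (hsafe.mpr hm), if_neg hm]
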